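-- pv_equiv track=rewrite | github.com/MateuszJanda/mtpc | mtpc.py | find_key_by_most_common_char
-- ===== SOURCE A (Python) =====
-- from collections import Counter
--
-- def find_key_by_most_common_char(enc_msgs, most_common_ch=' '):
--     """ Find key by most common character (be default space) """
--     counters = []
--     for e in enc_msgs:
--         for ix in range(len(e)):
--             if ix == len(counters):
--                 counters.append(Counter())
--             counters[ix][e[ix]] += 1
--
--     most_common_byte = ord(most_common_ch)
--     keys_candidates = []
--     for ix in range(len(counters)):
--         keys_candidates.append([counters[ix].most_common(1)[0][0] ^ most_common_byte])
--
--     return keys_candidates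
-- ===== SOURCE B (Python) =====
-- from collections import Counter
--
-- def find_key_by_most_common_char(enc_msgs, most_common_ch=' '):
--     """ Find key by most common character (by default space) """
--     most_common_byte = ord(most_common_ch)
--     width = max((len(e) for e in enc_msgs), default=0)
--     keys_candidates = []
--     for ix in range(width):
--         counter = Counter(e[ix] for e in enc_msgs if ix < len(e))
--         keys_candidates.append([counter.most_common(1)[0][0] ^ most_common_byte])
--     return keys_candidates
-- ===== Notes on version B (the rewrite author's own statement) =====
-- stated objective: idiomatic
-- what changed: Column-first: instead of growing a list of counters row by row while scanning every message, B computes the key width once and builds each column's Counter directly from the messages long enough to reach it; per-column insertion order is preserved, so most_common tie-breaking is identical.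
import Mathlib
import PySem

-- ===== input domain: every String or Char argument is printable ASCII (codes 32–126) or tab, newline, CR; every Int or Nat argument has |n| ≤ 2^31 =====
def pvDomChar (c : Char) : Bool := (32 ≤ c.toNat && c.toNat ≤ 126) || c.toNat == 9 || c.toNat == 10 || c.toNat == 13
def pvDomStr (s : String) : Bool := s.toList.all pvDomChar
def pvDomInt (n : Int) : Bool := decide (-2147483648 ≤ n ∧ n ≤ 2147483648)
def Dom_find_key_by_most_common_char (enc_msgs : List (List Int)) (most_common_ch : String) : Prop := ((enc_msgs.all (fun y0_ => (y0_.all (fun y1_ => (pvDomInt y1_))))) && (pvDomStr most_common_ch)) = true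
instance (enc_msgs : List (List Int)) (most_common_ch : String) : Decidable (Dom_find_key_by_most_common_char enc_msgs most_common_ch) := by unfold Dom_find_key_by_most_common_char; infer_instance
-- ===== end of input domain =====

-- B recovers the XOR key column-first (width computed once, one Counter per column) instead of
-- A's row-first scan that grows a list of counters; objective: more idiomatic, same cost.

-- ===== PORT A =====
-- counter.most_common(1)[0][0]: first key attaining the maximal count (insertion order breaks ties);
-- the .getD (0, 0) default is never reached where A uses it (its counters are nonempty).
def pvMostCommon1 (d : PySem.Dict Int Int) : Int :=
  ((PySem.List.max? d.items (fun p => p.2)).getD (0, 0)).1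

-- the body of A's outer loop: 'for ix in range(len(e)): if ix == len(counters): append Counter(); counters[ix][e[ix]] += 1'
def pvStepA (cs : List (PySem.Dict Int Int)) (e : List Int) : List (PySem.Dict Int Int) :=
  (List.range e.length).foldl (fun cs ix =>
    let cs' := if ix = cs.length then cs ++ [PySem.Dict.empty] else cs
    cs'.modify ix (fun d => d.modify (e.getD ix 0) 0 (· + 1))) cs

def find_key_by_most_common_char (enc_msgs : List (List Int)) (most_common_ch : String) : List (List Int) :=
  let counters := enc_msgs.foldl pvStepA []
  let most_common_byte : Int := ((most_common_ch.toList.headD ' ').toNat : Int)  -- ord(most_common_ch); Pre_ guarantees one char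
  counters.foldl (fun acc d => acc ++ [[PySem.Int.bxor (pvMostCommon1 d) most_common_byte]]) []

-- ===== PORT B =====
def find_key_by_most_common_char_alt (enc_msgs : List (List Int)) (most_common_ch : String) : List (List Int) :=
  let most_common_byte : Int := ((most_common_ch.toList.headD ' ').toNat : Int)  -- ord(most_common_ch); Pre_ guarantees one char
  let width := enc_msgs.foldl (fun m e => max m e.length) 0                       -- max((len(e) for e in enc_msgs), default=0)
  (List.range width).map (fun ix =>
    [PySem.Int.bxor (pvMostCommon1 (PySem.Dict.counter (enc_msgs.filterMap (fun e => e[ix]?)))) most_common_byte])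

-- ===== PRECONDITION & SPEC =====
-- Pre_ excludes only the inputs where A raises: ord(most_common_ch) is a TypeError unless the string has exactly one character.
def Pre_find_key_by_most_common_char (enc_msgs : List (List Int)) (most_common_ch : String) : Prop :=
  most_common_ch.toList.length = 1
instance (enc_msgs : List (List Int)) (most_common_ch : String) : Decidable (Pre_find_key_by_most_common_char enc_msgs most_common_ch) := by unfold Pre_find_key_by_most_common_char; infer_instance

def pvWitness_find_key_by_most_common_char : List (List Int) × String := ([[1, 2], [3]], " ")

def Spec_find_key_by_most_common_char (enc_msgs : List (List Int)) (most_common_ch : String) (out : List (List Int)) : Prop := out = find_key_by_most_common_char_alt enc_msgs most_common_ch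
instance (enc_msgs : List (List Int)) (most_common_ch : String) (out : List (List Int)) : Decidable (Spec_find_key_by_most_common_char enc_msgs most_common_ch out) := by unfold Spec_find_key_by_most_common_char; infer_instance

-- ===== CLAIM (what is proved, stated in full; the proofs are below) =====
def Claim_equal_find_key_by_most_common_char : Prop := ∀ (enc_msgs : List (List Int)) (most_common_ch : String), Dom_find_key_by_most_common_char enc_msgs most_common_ch → Pre_find_key_by_most_common_char enc_msgs most_common_ch → Spec_find_key_by_most_common_char enc_msgs most_common_ch (find_key_by_most_common_char enc_msgs most_common_ch)

-- ===== LEMMAS AND PROOFS =====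

-- the j-th column of the messages (rows shorter than j+1 contribute nothing), in message order
def pvCol (rs : List (List Int)) (j : Nat) : List Int := rs.filterMap (fun e => e[j]?)

-- the running maximum of the message lengths
def pvMaxLen (rs : List (List Int)) : Nat := rs.foldl (fun m e => max m e.length) 0

lemma pv_map_getD_range (cs : List (PySem.Dict Int Int)) :
    (List.range cs.length).map (fun j => cs.getD j PySem.Dict.empty) = cs := by
  apply List.ext_getElem
  · simp
  · intro i h1 h2
    simp [List.getD_eq_getElem?_getD, List.getElem?_eq_getElem h2]

lemma pvMaxLen_ge (rs : List (List Int)) : ∀ r ∈ rs, r.length ≤ pvMaxLen rs :=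
  (PySem.List.le_foldl_max_nat rs List.length 0).2

lemma pvCol_eq_nil (rs : List (List Int)) (j : Nat) (hj : pvMaxLen rs ≤ j) : pvCol rs j = [] := by
  simp only [pvCol, List.filterMap_eq_nil_iff]
  intro e he
  simp [List.getElem?_eq_none (le_trans (pvMaxLen_ge rs e he) hj)]

lemma pvCol_append (rs : List (List Int)) (e : List Int) (j : Nat) :
    pvCol (rs ++ [e]) j = pvCol rs j ++ e[j]?.toList := by
  simp only [pvCol, List.filterMap_append]
  cases h : e[j]? <;> simp [List.filterMap, h]

lemma pvMaxLen_append (rs : List (List Int)) (e : List Int) :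
    pvMaxLen (rs ++ [e]) = max (pvMaxLen rs) e.length := by
  simp [pvMaxLen, List.foldl_append]

lemma pv_inner (e : List Int) : ∀ (n : Nat), n ≤ e.length → ∀ (cs : List (PySem.Dict Int Int)),
    (List.range n).foldl (fun cs ix =>
        let cs' := if ix = cs.length then cs ++ [PySem.Dict.empty] else cs
        cs'.modify ix (fun d => d.modify (e.getD ix 0) 0 (· + 1))) cs
    = (List.range (max cs.length n)).map (fun j =>
        if j < n then (cs.getD j PySem.Dict.empty).modify (e.getD j 0) 0 (· + 1)
        else cs.getD j PySem.Dict.empty) := by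
  intro n
  induction n with
  | zero => intro _ cs; simpa using (pv_map_getD_range cs).symm
  | succ n ih =>
    intro hn cs
    rw [List.range_succ, List.foldl_append, ih (by omega) cs]
    simp only [List.foldl_cons, List.foldl_nil]
    set g : Nat → PySem.Dict Int Int := fun j =>
        if j < n then (cs.getD j PySem.Dict.empty).modify (e.getD j 0) 0 (· + 1)
        else cs.getD j PySem.Dict.empty with hg
    set M : List (PySem.Dict Int Int) := (List.range (max cs.length n)).map g with hM
    have hMlen : M.length = max cs.length n := by simp [hM]
    have hMget : ∀ i (h : i < M.length), M[i] = g i := by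
      intro i h; simp [hM]
    by_cases hLn : cs.length ≤ n
    · have hc : (n = M.length) = True := by simp [hMlen]; omega
      simp only [hc, if_true]
      apply List.ext_getElem
      · simp [List.length_modify, hMlen]; omega
      · intro i h1 h2
        rw [List.getElem_modify]
        simp only [List.length_map, List.length_range] at h2
        rw [List.getElem_map, List.getElem_range]
        have hi1 : i < M.length + 1 := by
          simpa [List.length_modify, List.length_append] using h1
        by_cases hin : n = i
        · subst hin
          rw [if_pos rfl, List.getElem_append_right (by omega)]
          have hd : cs.getD n PySem.Dict.empty = PySem.Dict.empty :=
            List.getD_eq_default _ _ (by omega)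
          simp [hMlen]
          rw [List.getElem?_eq_none (show cs.length ≤ n by omega)]
          rfl
        · rw [if_neg hin]
          have hi : i < n := by omega
          rw [List.getElem_append_left (by omega), hMget i (by omega), hg]
          simp [hi, Nat.lt_succ_of_lt hi]
    · have hc : ¬ (n = M.length) := by rw [hMlen]; omega
      simp only [if_neg hc]
      apply List.ext_getElem
      · simp [List.length_modify, hMlen]; omega
      · intro i h1 h2
        rw [List.getElem_modify]
        simp only [List.length_map, List.length_range] at h2
        simp only [List.getElem_map, List.getElem_range]
        have h1' : i < M.length := by simpa [List.length_modify] using h1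
        rw [hMget i h1', hg]
        by_cases hin : n = i
        · subst hin
          simp
        · by_cases hi : i < n
          · simp [hin, hi, Nat.lt_succ_of_lt hi]
          · have hi1 : ¬ i < n + 1 := by omega
            simp [hin, hi, hi1]

lemma pv_build (rs : List (List Int)) :
    rs.foldl pvStepA [] = (List.range (pvMaxLen rs)).map (fun j => PySem.Dict.counter (pvCol rs j)) := by
  induction rs using List.reverseRecOn with
  | nil => simp [pvMaxLen]
  | append_singleton rs e ih =>
    rw [List.foldl_append, List.foldl_cons, List.foldl_nil, ih]
    set M := pvMaxLen rs with hMdef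
    set cs : List (PySem.Dict Int Int) :=
      (List.range M).map (fun j => PySem.Dict.counter (pvCol rs j)) with hcs
    have hcsl : cs.length = M := by simp [hcs]
    have hgetD : ∀ j, cs.getD j PySem.Dict.empty = PySem.Dict.counter (pvCol rs j) := by
      intro j
      by_cases hj : j < M
      · rw [List.getD_eq_getElem?_getD, List.getElem?_eq_getElem (by simp [hcsl, hj])]
        simp [hcs]
      · rw [List.getD_eq_default _ _ (by omega), pvCol_eq_nil rs j (by omega)]
        rfl
    rw [pvStepA, pv_inner e e.length le_rfl cs, hcsl, pvMaxLen_append]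
    apply List.map_congr_left
    intro j hj
    rw [hgetD j]
    by_cases hje : j < e.length
    · rw [if_pos hje, pvCol_append, List.getElem?_eq_getElem hje]
      rw [List.getD_eq_getElem _ _ hje]
      exact (PySem.Dict.counter_append_singleton _ _).symm
    · rw [if_neg hje, pvCol_append, List.getElem?_eq_none (by omega)]
      simp

-- ===== VERDICT (by name: the statement is the Claim_ definition above) =====
theorem find_key_by_most_common_char_spec : Claim_equal_find_key_by_most_common_char := by
  intro enc_msgs most_common_ch _ _
  unfold Spec_find_key_by_most_common_char find_key_by_most_common_char find_key_by_most_common_char_alt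
  rw [pv_build, PySem.List.foldl_append_singleton_eq_map
    (f := fun d => [PySem.Int.bxor (pvMostCommon1 d) ((most_common_ch.toList.headD ' ').toNat : Int)])]
  simp [List.map_map, pvMaxLen, pvCol, Function.comp]
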